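-- pv_equiv track=rewrite | github.com/23abdul23/TAU-KG | test/gliner_pipeline.py | map_to_unified_label
-- ===== SOURCE A (Python) =====
-- from typing import Dict, List, Optional, Tuple
--
-- def map_to_unified_label(model_name: str, raw_label: str) -> Optional[str]:
--     label_upper = (raw_label or "").upper()
--
--     if model_name == "gliner_biomed_disease":
--         return "DISEASE"
--
--     if model_name == "en_ner_bc5cdr_md":
--         if "DISEASE" in label_upper:
--             return "DISEASE"
--         return None
--
--     if model_name == "en_ner_bionlp13cg_md":
--         if "GENE" in label_upper or "PROTEIN" in label_upper:
--             return "GENE_OR_PROTEIN"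
--         return None
--
--     if model_name == "en_ner_jnlpba_md":
--         # JNLPBA provides DNA/RNA/PROTEIN/CELL labels; keep gene/protein-related labels.
--         if any(k in label_upper for k in ("GENE", "DNA", "RNA", "PROTEIN")):
--             return "GENE_OR_PROTEIN"
--         return None
--
--     if model_name == "en_ner_craft_md":
--         # Keep GO terms as pathway proxy. Be tolerant to naming variants.
--         if "GO" in label_upper or "GO_TERM" in label_upper:
--             return "PATHWAY"
--         return None
--
--     return None
-- ===== SOURCE B (Python) =====
-- # Rule-engine formulation: one flat list of (model, keyword, result) rules scanned
-- # first-match; "" matches every label ('"" in s' is always True in Python).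
-- _RULES = [
--     ("gliner_biomed_disease", "", "DISEASE"),
--     ("en_ner_bc5cdr_md", "DISEASE", "DISEASE"),
--     ("en_ner_bionlp13cg_md", "GENE", "GENE_OR_PROTEIN"),
--     ("en_ner_bionlp13cg_md", "PROTEIN", "GENE_OR_PROTEIN"),
--     ("en_ner_jnlpba_md", "GENE", "GENE_OR_PROTEIN"),
--     ("en_ner_jnlpba_md", "DNA", "GENE_OR_PROTEIN"),
--     ("en_ner_jnlpba_md", "RNA", "GENE_OR_PROTEIN"),
--     ("en_ner_jnlpba_md", "PROTEIN", "GENE_OR_PROTEIN"),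
--     ("en_ner_craft_md", "GO", "PATHWAY"),
-- ]
--
-- def map_to_unified_label(model_name: str, raw_label: str):
--     label_upper = raw_label.upper()
--     return next((result for model, keyword, result in _RULES
--                  if model == model_name and keyword in label_upper), None)
-- ===== Notes on version B (the rewrite author's own statement) =====
-- stated objective: alternative
-- what changed: Replaces the five-branch if-chain (equality dispatch on model, then per-branch multi-keyword any()) by a flat rule database of (model, keyword, result) triples scanned once with first-match semantics, the unconditional case expressed as the empty keyword; the redundant GO_TERM test disappears.
import Mathlib
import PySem

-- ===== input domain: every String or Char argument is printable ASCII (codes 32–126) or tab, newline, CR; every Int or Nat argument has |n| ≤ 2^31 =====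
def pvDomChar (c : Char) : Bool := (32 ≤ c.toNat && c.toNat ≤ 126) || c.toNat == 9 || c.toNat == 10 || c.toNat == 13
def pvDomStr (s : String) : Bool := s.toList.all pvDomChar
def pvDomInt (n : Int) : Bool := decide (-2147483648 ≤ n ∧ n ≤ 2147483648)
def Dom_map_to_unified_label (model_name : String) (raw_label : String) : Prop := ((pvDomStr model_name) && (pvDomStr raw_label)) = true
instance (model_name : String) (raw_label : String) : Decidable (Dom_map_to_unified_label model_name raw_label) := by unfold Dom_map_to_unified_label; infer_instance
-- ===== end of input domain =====

-- B replaces A's five-branch if-chain by a first-match scan over a flat rule list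
-- (model, keyword, result), the unconditional case being the empty keyword (objective: alternative).

-- ===== PORT A =====
def map_to_unified_label (model_name : String) (raw_label : String) : Option String :=
  -- `(raw_label or "").upper()`: `raw_label or ""` is raw_label unless it is "", then ""
  let label_upper := PySem.Str.upper (if raw_label == "" then "" else raw_label)
  if model_name == "gliner_biomed_disease" then some "DISEASE"
  else if model_name == "en_ner_bc5cdr_md" then
    if PySem.Str.isIn "DISEASE" label_upper then some "DISEASE" else none
  else if model_name == "en_ner_bionlp13cg_md" then
    if PySem.Str.isIn "GENE" label_upper || PySem.Str.isIn "PROTEIN" label_upper then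
      some "GENE_OR_PROTEIN"
    else none
  else if model_name == "en_ner_jnlpba_md" then
    if (["GENE", "DNA", "RNA", "PROTEIN"].any fun k => PySem.Str.isIn k label_upper) then
      some "GENE_OR_PROTEIN"
    else none
  else if model_name == "en_ner_craft_md" then
    if PySem.Str.isIn "GO" label_upper || PySem.Str.isIn "GO_TERM" label_upper then
      some "PATHWAY"
    else none
  else none

-- ===== PORT B =====
def pvRules : List (String × String × String) :=
  [ ("gliner_biomed_disease", "", "DISEASE")
  , ("en_ner_bc5cdr_md", "DISEASE", "DISEASE")
  , ("en_ner_bionlp13cg_md", "GENE", "GENE_OR_PROTEIN")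
  , ("en_ner_bionlp13cg_md", "PROTEIN", "GENE_OR_PROTEIN")
  , ("en_ner_jnlpba_md", "GENE", "GENE_OR_PROTEIN")
  , ("en_ner_jnlpba_md", "DNA", "GENE_OR_PROTEIN")
  , ("en_ner_jnlpba_md", "RNA", "GENE_OR_PROTEIN")
  , ("en_ner_jnlpba_md", "PROTEIN", "GENE_OR_PROTEIN")
  , ("en_ner_craft_md", "GO", "PATHWAY") ]

def map_to_unified_label_alt (model_name : String) (raw_label : String) : Option String :=
  let label_upper := PySem.Str.upper raw_label
  -- `next((result for … if model == model_name and keyword in label_upper), None)`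
  (pvRules.find? fun r => r.1 == model_name && PySem.Str.isIn r.2.1 label_upper).map
    fun r => r.2.2

-- ===== PRECONDITION & SPEC =====
def Spec_map_to_unified_label (model_name : String) (raw_label : String) (out : Option String) : Prop := out = map_to_unified_label_alt model_name raw_label
instance (model_name : String) (raw_label : String) (out : Option String) : Decidable (Spec_map_to_unified_label model_name raw_label out) := by unfold Spec_map_to_unified_label; infer_instance

-- ===== CLAIM (what is proved, stated in full; the proofs are below) =====
def Claim_equal_map_to_unified_label : Prop := ∀ (model_name : String) (raw_label : String), Dom_map_to_unified_label model_name raw_label → Spec_map_to_unified_label model_name raw_label (map_to_unified_label model_name raw_label)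

-- ===== LEMMAS AND PROOFS =====

-- `raw_label or ""` is just raw_label (empty falls through to empty)
theorem pv_or_empty (s : String) : (if s == "" then "" else s) = s := by
  by_cases h : s = "" <;> simp [h]

-- A's redundant craft test: a string containing "GO_TERM" contains "GO"
theorem pv_go_term (l : List Char) (h : PySem.Chars.isIn ['G','O','_','T','E','R','M'] l = true) :
    PySem.Chars.isIn ['G','O'] l = true := by
  rw [PySem.Chars.isIn_iff_infix] at h ⊢
  exact List.IsInfix.trans (by decide) h

-- ===== VERDICT (by name: the statement is the Claim_ definition above) =====
theorem map_to_unified_label_spec : Claim_equal_map_to_unified_label := by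
  intro model_name raw_label _
  unfold Spec_map_to_unified_label map_to_unified_label map_to_unified_label_alt pvRules
  rw [pv_or_empty]
  by_cases h1 : model_name = "gliner_biomed_disease"
  · subst h1; simp [List.find?]
  by_cases h2 : model_name = "en_ner_bc5cdr_md"
  · subst h2
    by_cases hd : PySem.Str.isIn "DISEASE" (PySem.Str.upper raw_label) = true <;>
      simp_all [List.find?]
  by_cases h3 : model_name = "en_ner_bionlp13cg_md"
  · subst h3
    by_cases hg : PySem.Str.isIn "GENE" (PySem.Str.upper raw_label) = true <;>
      by_cases hp : PySem.Str.isIn "PROTEIN" (PySem.Str.upper raw_label) = true <;>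
      simp_all [List.find?]
  by_cases h4 : model_name = "en_ner_jnlpba_md"
  · subst h4
    by_cases hg : PySem.Str.isIn "GENE" (PySem.Str.upper raw_label) = true <;>
      by_cases hd : PySem.Str.isIn "DNA" (PySem.Str.upper raw_label) = true <;>
      by_cases hr : PySem.Str.isIn "RNA" (PySem.Str.upper raw_label) = true <;>
      by_cases hp : PySem.Str.isIn "PROTEIN" (PySem.Str.upper raw_label) = true <;>
      simp_all [List.find?]
  by_cases h5 : model_name = "en_ner_craft_md"
  · subst h5
    by_cases hgo : PySem.Chars.isIn ['G','O'] (PySem.Chars.upper raw_label.toList) = true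
    · simp [List.find?, PySem.Str.isIn, PySem.Str.upper, hgo]
    · have hterm : PySem.Chars.isIn ['G','O','_','T','E','R','M'] (PySem.Chars.upper raw_label.toList) = false := by
        cases htermc : PySem.Chars.isIn ['G','O','_','T','E','R','M'] (PySem.Chars.upper raw_label.toList)
        · rfl
        · exact absurd (pv_go_term _ htermc) hgo
      simp [List.find?, PySem.Str.isIn, PySem.Str.upper, hgo, hterm]
  · have e1 : ("gliner_biomed_disease" == model_name) = false := beq_eq_false_iff_ne.mpr (Ne.symm h1)
    have e2 : ("en_ner_bc5cdr_md" == model_name) = false := beq_eq_false_iff_ne.mpr (Ne.symm h2)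
    have e3 : ("en_ner_bionlp13cg_md" == model_name) = false := beq_eq_false_iff_ne.mpr (Ne.symm h3)
    have e4 : ("en_ner_jnlpba_md" == model_name) = false := beq_eq_false_iff_ne.mpr (Ne.symm h4)
    have e5 : ("en_ner_craft_md" == model_name) = false := beq_eq_false_iff_ne.mpr (Ne.symm h5)
    simp [List.find?, e1, e2, e3, e4, e5, h1, h2, h3, h4, h5]
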